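-- pv_equiv track=rewrite | github.com/shensquared/valve | verify_classdays.py | check_required_holidays
-- ===== SOURCE A (Python) =====
-- def check_required_holidays(data, keys, season):
--     """Check that all required holidays exist."""
--     holidays = data.get('holidays', [])
--     holiday_names = [h['name'].lower() for h in holidays]
--
--     required = list(keys.get('holidays', {}).get('common', []))
--     required.extend(keys.get('holidays', {}).get(season, []))
--
--     missing = []
--     for req in required:
--         req_lower = req.lower()
--         if not any(req_lower in name for name in holiday_names):
--             missing.append(req)
--
--     return missing
-- ===== SOURCE B (Python) =====
-- def check_required_holidays(data, keys, season):
--     """Check that all required holidays exist."""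
--     hk = keys.get('holidays', {})
--     required = list(hk.get('common', [])) + list(hk.get(season, []))
--
--     found = set()
--     for h in data.get('holidays', []):
--         name = h['name'].lower()
--         for req in required:
--             if req.lower() in name:
--                 found.add(req)
--
--     return [req for req in required if req not in found]
-- ===== Notes on version B (the rewrite author's own statement) =====
-- stated objective: alternative
-- what changed: Instead of precomputing a lowercased name list and scanning it with any() once per required entry, B loops holiday names in the outer loop and required entries in the inner loop, accumulating matched entries in a `found` set, then filters `required` against that set (order and duplicates preserved).
import Mathlib
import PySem

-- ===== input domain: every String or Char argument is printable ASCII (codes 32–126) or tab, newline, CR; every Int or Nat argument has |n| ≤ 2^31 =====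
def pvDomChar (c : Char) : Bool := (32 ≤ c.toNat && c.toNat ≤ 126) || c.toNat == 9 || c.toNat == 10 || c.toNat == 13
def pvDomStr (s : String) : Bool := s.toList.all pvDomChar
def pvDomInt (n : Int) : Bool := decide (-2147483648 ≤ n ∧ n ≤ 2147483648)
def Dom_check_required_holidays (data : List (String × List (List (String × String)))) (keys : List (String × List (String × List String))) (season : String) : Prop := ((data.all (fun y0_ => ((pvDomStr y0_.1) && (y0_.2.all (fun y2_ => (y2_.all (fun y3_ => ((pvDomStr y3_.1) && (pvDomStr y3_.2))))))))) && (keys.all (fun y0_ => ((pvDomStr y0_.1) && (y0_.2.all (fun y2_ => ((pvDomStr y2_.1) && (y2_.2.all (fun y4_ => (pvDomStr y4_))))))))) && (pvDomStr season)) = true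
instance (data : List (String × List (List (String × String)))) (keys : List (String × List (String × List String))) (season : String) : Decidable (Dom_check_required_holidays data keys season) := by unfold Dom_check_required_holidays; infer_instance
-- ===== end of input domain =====

-- B differs from A by decomposition: instead of precomputing the lowercased name list and
-- scanning it once per required entry, B maintains a `found` set while looping names-outer /
-- required-inner, then filters `required` against it (objective: alternative).

-- ===== PORT A =====
def check_required_holidays (data : List (String × List (List (String × String)))) (keys : List (String × List (String × List String))) (season : String) : List String :=
  let holidays := (PySem.Dict.mk data).getD "holidays" []
  let holiday_names := holidays.map (fun h => PySem.Str.lower (((PySem.Dict.mk h).get? "name").getD ""))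
  let required := (PySem.Dict.mk ((PySem.Dict.mk keys).getD "holidays" [])).getD "common" []
  let required := required ++ (PySem.Dict.mk ((PySem.Dict.mk keys).getD "holidays" [])).getD season []
  required.foldl (fun missing req =>
    let req_lower := PySem.Str.lower req
    if ¬ (holiday_names.any (fun name => PySem.Str.isIn req_lower name) = true) then missing ++ [req]
    else missing) []

-- ===== PORT B =====
def check_required_holidays_alt (data : List (String × List (List (String × String)))) (keys : List (String × List (String × List String))) (season : String) : List String :=
  let hk := (PySem.Dict.mk keys).getD "holidays" []
  let required := ((PySem.Dict.mk hk).getD "common" []) ++ ((PySem.Dict.mk hk).getD season [])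
  let found : PySem.Set String :=
    ((PySem.Dict.mk data).getD "holidays" []).foldl (fun found h =>
      let name := PySem.Str.lower (((PySem.Dict.mk h).get? "name").getD "")
      required.foldl (fun found req =>
        if PySem.Str.isIn (PySem.Str.lower req) name then PySem.Set.add found req else found) found)
      PySem.Set.empty
  required.filter (fun req => ¬ (PySem.Set.contains found req = true))

-- ===== PRECONDITION & SPEC =====
-- Pre_ excludes exactly the inputs on which A raises KeyError: a holiday dict without a "name" key.
def Pre_check_required_holidays (data : List (String × List (List (String × String)))) (keys : List (String × List (String × List String))) (season : String) : Prop :=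
  ∀ h ∈ (PySem.Dict.mk data).getD "holidays" [], ((PySem.Dict.mk h).get? "name").isSome
instance (data : List (String × List (List (String × String)))) (keys : List (String × List (String × List String))) (season : String) : Decidable (Pre_check_required_holidays data keys season) := by unfold Pre_check_required_holidays; infer_instance

def pvWitness_check_required_holidays : (List (String × List (List (String × String)))) × (List (String × List (String × List String))) × String :=
  ([("holidays", [[("name", "Xmas Day")]])], [("holidays", [("common", ["xmas"]), ("fall", ["Eid"])])], "fall")

def Spec_check_required_holidays (data : List (String × List (List (String × String)))) (keys : List (String × List (String × List String))) (season : String) (out : List String) : Prop := out = check_required_holidays_alt data keys season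
instance (data : List (String × List (List (String × String)))) (keys : List (String × List (String × List String))) (season : String) (out : List String) : Decidable (Spec_check_required_holidays data keys season out) := by unfold Spec_check_required_holidays; infer_instance

-- ===== CLAIM (what is proved, stated in full; the proofs are below) =====
def Claim_equal_check_required_holidays : Prop := ∀ (data : List (String × List (List (String × String)))) (keys : List (String × List (String × List String))) (season : String), Dom_check_required_holidays data keys season → Pre_check_required_holidays data keys season → Spec_check_required_holidays data keys season (check_required_holidays data keys season)

-- ===== LEMMAS AND PROOFS =====

-- inner loop of B (one holiday name): membership in `found` afterwards
lemma found_inner (required : List String) (name : String) (s : PySem.Set String) (req : String) :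
    req ∈ (required.foldl (fun found r =>
        if PySem.Str.isIn (PySem.Str.lower r) name then PySem.Set.add found r else found) s) ↔
      req ∈ s ∨ (req ∈ required ∧ PySem.Str.isIn (PySem.Str.lower req) name = true) := by
  induction required generalizing s with
  | nil => simp
  | cons r rest ih =>
    simp only [List.foldl_cons, List.mem_cons]
    by_cases h : PySem.Str.isIn (PySem.Str.lower r) name = true
    · rw [if_pos h, ih]
      simp only [PySem.Set.mem_add]
      constructor
      · rintro (((hs | rfl) | ⟨hm, hi⟩))
        · exact Or.inl hs
        · exact Or.inr ⟨Or.inl rfl, h⟩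
        · exact Or.inr ⟨Or.inr hm, hi⟩
      · rintro ((hs | ⟨(rfl | hm), hi⟩))
        · exact Or.inl (Or.inl hs)
        · exact Or.inl (Or.inr rfl)
        · exact Or.inr ⟨hm, hi⟩
    · rw [if_neg h, ih]
      constructor
      · rintro ((hs | ⟨hm, hi⟩))
        · exact Or.inl hs
        · exact Or.inr ⟨Or.inr hm, hi⟩
      · rintro ((hs | ⟨(rfl | hm), hi⟩))
        · exact Or.inl hs
        · exact absurd hi h
        · exact Or.inr ⟨hm, hi⟩

-- outer loop of B, generalized over the name-extraction function `nm`
lemma found_outer (nm : List (String × String) → String) (required : List String)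
    (holidays : List (List (String × String))) (s : PySem.Set String) (req : String) :
    req ∈ (holidays.foldl (fun found h =>
        required.foldl (fun found r =>
          if PySem.Str.isIn (PySem.Str.lower r) (nm h) then PySem.Set.add found r else found) found) s) ↔
      req ∈ s ∨ (req ∈ required ∧
        (holidays.map nm).any (fun n => PySem.Str.isIn (PySem.Str.lower req) n) = true) := by
  induction holidays generalizing s with
  | nil => simp
  | cons h rest ih =>
    simp only [List.foldl_cons, List.map_cons, List.any_cons]
    rw [ih, found_inner]
    constructor
    · rintro (((hs | ⟨hm, hi⟩) | ⟨hm', hi'⟩))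
      · exact Or.inl hs
      · exact Or.inr ⟨hm, Bool.or_eq_true_iff.mpr (Or.inl hi)⟩
      · exact Or.inr ⟨hm', Bool.or_eq_true_iff.mpr (Or.inr hi')⟩
    · rintro ((hs | ⟨hm, hi⟩))
      · exact Or.inl (Or.inl hs)
      · rcases Bool.or_eq_true_iff.mp hi with h1 | h2
        · exact Or.inl (Or.inr ⟨hm, h1⟩)
        · exact Or.inr ⟨hm, h2⟩

-- ===== VERDICT (by name: the statement is the Claim_ definition above) =====
theorem check_required_holidays_spec : Claim_equal_check_required_holidays := by
  intro data keys season _ _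
  unfold Spec_check_required_holidays check_required_holidays check_required_holidays_alt
  simp only []
  rw [PySem.List.foldl_append_ite_eq_filter]
  rw [List.nil_append]
  apply List.filter_congr
  intro req hreq
  have hfold := found_outer (fun h => PySem.Str.lower (((PySem.Dict.mk h).get? "name").getD ""))
    (((PySem.Dict.mk ((PySem.Dict.mk keys).getD "holidays" [])).getD "common" []) ++
      ((PySem.Dict.mk ((PySem.Dict.mk keys).getD "holidays" [])).getD season []))
    ((PySem.Dict.mk data).getD "holidays" []) PySem.Set.empty req
  simp only [show (PySem.Set.empty : PySem.Set String) = [] from rfl] at hfold ⊢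
  simp only [List.not_mem_nil, false_or] at hfold
  rw [← PySem.Set.contains_iff] at hfold
  simp only [decide_eq_decide]
  rw [not_iff_not, hfold]
  simp [hreq]
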